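-- pv_equiv track=rewrite | github.com/ssongkim2/algorithm | 3499_퍼펙트 셔플/sol1.py | solution
-- ===== SOURCE A (Python) =====
-- def solution(deck):
--     deck2 = []
--     deck3 = []
--     deck4 = []
--     if len(deck) % 2 == 0:
--         for idx in range(len(deck)//2):
--             deck2.append(deck[idx])
--             deck2.append(deck[idx+(len(deck)//2)])
--         return deck2
--     if len(deck) % 2 == 1:
--         deck2 = deck[0:(len(deck)//2+1)]
--         deck3 = deck[len(deck)//2+1:]
--         for idx in range(len(deck)//2):
--             deck4.append(deck2[idx])
--             deck4.append(deck3[idx])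
--         deck4.append(deck2[-1])
--         return deck4
-- ===== SOURCE B (Python) =====
-- def solution(deck):
--     n = len(deck)
--     half = (n + 1) // 2
--     out = [None] * n
--     out[0::2] = deck[:half]
--     out[1::2] = deck[half:]
--     return out
-- ===== Notes on version B (the rewrite author's own statement) =====
-- stated objective: idiomatic
-- what changed: Replaces A's even/odd branch with two element-by-element interleaving loops by a loop-free scatter: preallocate the output and assign the two halves into the even and odd strided slices via extended slice assignment.
import Mathlib
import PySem

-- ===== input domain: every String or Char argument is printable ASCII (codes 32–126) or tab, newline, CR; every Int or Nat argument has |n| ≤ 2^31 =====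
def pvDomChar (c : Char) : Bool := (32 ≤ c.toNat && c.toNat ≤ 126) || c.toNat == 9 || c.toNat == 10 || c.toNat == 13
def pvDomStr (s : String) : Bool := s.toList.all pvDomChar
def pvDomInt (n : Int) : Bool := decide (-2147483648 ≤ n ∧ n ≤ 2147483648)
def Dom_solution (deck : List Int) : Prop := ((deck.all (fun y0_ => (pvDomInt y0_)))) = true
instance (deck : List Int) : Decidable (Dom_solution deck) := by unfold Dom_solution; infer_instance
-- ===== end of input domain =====

-- B replaces A's even/odd branch with two interleaving append loops by a loop-free scatter:
-- preallocate the output and assign the two halves into the even and odd strided slices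
-- (objective: idiomatic, same cost).

-- ===== PORT A =====
def solution (deck : List Int) : List Int :=
  let n : Int := deck.length
  if PySem.Int.mod n 2 = 0 then
    (PySem.List.pyRange 0 (PySem.Int.floordiv n 2) 1).foldl
      (fun acc idx =>
        acc ++ [PySem.List.pyGetD deck idx 0] ++ [PySem.List.pyGetD deck (idx + PySem.Int.floordiv n 2) 0]) []
  else
    let deck2 := PySem.List.slice deck (some 0) (some (PySem.Int.floordiv n 2 + 1))
    let deck3 := PySem.List.slice deck (some (PySem.Int.floordiv n 2 + 1)) none
    let deck4 := (PySem.List.pyRange 0 (PySem.Int.floordiv n 2) 1).foldl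
      (fun acc idx => acc ++ [PySem.List.pyGetD deck2 idx 0] ++ [PySem.List.pyGetD deck3 idx 0]) []
    deck4 ++ [PySem.List.pyGetD deck2 (-1) 0]

-- ===== PORT B =====
-- B-side helper: extended slice assignment 'out[start::2] = xs' (write xs at positions
-- start, start+2, …); exact here since every write in B is in range.
def setStride2 (out : List Int) (start : Nat) (xs : List Int) : List Int :=
  match xs with
  | [] => out
  | x :: rest => setStride2 (out.set start x) (start + 2) rest

def solution_alt (deck : List Int) : List Int :=
  let n := deck.length
  let half := (n + 1) / 2        -- (n+1)//2, exact on nonnegative n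
  let out0 := List.replicate n (0 : Int)   -- placeholder 0 for Python's None; every slot is overwritten
  let out1 := setStride2 out0 0 (deck.take half)   -- out[0::2] = deck[:half]
  setStride2 out1 1 (deck.drop half)               -- out[1::2] = deck[half:]

-- ===== PRECONDITION & SPEC =====
def Spec_solution (deck : List Int) (out : List Int) : Prop := out = solution_alt deck
instance (deck : List Int) (out : List Int) : Decidable (Spec_solution deck out) := by unfold Spec_solution; infer_instance

-- ===== CLAIM (what is proved, stated in full; the proofs are below) =====
def Claim_equal_solution : Prop := ∀ (deck : List Int), Dom_solution deck → Spec_solution deck (solution deck)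

-- ===== LEMMAS AND PROOFS =====

-- Proof-side reference form: the shuffle written as one index-mapped pass.
def shufInt (deck : List Int) : List Int :=
  let n : Int := deck.length
  let half : Int := PySem.Int.floordiv (n + 1) 2
  (PySem.List.pyRange 0 n 1).map
    (fun i =>
      if PySem.Int.mod i 2 = 0 then PySem.List.pyGetD deck (PySem.Int.floordiv i 2) 0
      else PySem.List.pyGetD deck (PySem.Int.floordiv i 2 + half) 0)

-- A's loop shape: a foldl appending a pair per index is a flatMap over the range.
theorem foldl_pair_flatMap (F G : Int → Int) (k : Nat) (init : List Int) :
    (PySem.List.pyRange 0 k 1).foldl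
      (fun acc idx => acc ++ [F idx] ++ [G idx]) init
      = init ++ (List.range k).flatMap (fun i => [F (i : Int), G (i : Int)]) := by
  induction k generalizing init with
  | zero => simp [PySem.List.pyRange_one_eq_nil]
  | succ k ih =>
    have h : ((k : Int) + 1) = ((k + 1 : Nat) : Int) := by push_cast; ring
    rw [← h, PySem.List.pyRange_one_succ_right (by positivity), List.foldl_append, ih,
      List.range_succ]
    simp

-- the reference's loop shape: a map over range(2k) (resp. 2k+1) splits into pairs (plus the last index).
theorem map_pyRange_double (F : Int → Int) (k : Nat) :
    (PySem.List.pyRange 0 (2 * (k : Int)) 1).map F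
      = (List.range k).flatMap (fun i => [F (2 * (i : Int)), F (2 * (i : Int) + 1)]) := by
  induction k with
  | zero => simp [PySem.List.pyRange_one_eq_nil]
  | succ k ih =>
    push_cast
    rw [show (2 * ((k : Int) + 1)) = (2 * (k : Int) + 1) + 1 by ring,
      PySem.List.pyRange_one_succ_right (by positivity),
      PySem.List.pyRange_one_succ_right (by positivity), List.range_succ]
    simp [ih]

theorem map_pyRange_double_succ (F : Int → Int) (k : Nat) :
    (PySem.List.pyRange 0 (2 * (k : Int) + 1) 1).map F
      = (List.range k).flatMap (fun i => [F (2 * (i : Int)), F (2 * (i : Int) + 1)]) ++ [F (2 * (k : Int))] := by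
  rw [PySem.List.pyRange_one_succ_right (by positivity)]
  simp [map_pyRange_double]

theorem pyGetD_take (deck : List Int) (t : Nat) (i : Nat) (h : i < t) :
    PySem.List.pyGetD (deck.take t) (i : Int) 0 = PySem.List.pyGetD deck (i : Int) 0 := by
  simp only [PySem.List.pyGetD_natCast]
  rw [List.getD, List.getD, List.getElem?_take]
  simp [h]

theorem pyGetD_drop (deck : List Int) (t : Nat) (i : Nat) :
    PySem.List.pyGetD (deck.drop t) (i : Int) 0 = PySem.List.pyGetD deck ((i : Int) + t) 0 := by
  have : ((i : Int) + t) = ((i + t : Nat) : Int) := by push_cast; ring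
  rw [this]
  simp only [PySem.List.pyGetD_natCast]
  rw [List.getD, List.getD, List.getElem?_drop, Nat.add_comm]

theorem floordiv_two_mul (i : Int) : PySem.Int.floordiv (2 * i) 2 = i := by
  rw [PySem.Int.floordiv_eq_ediv_of_pos (by norm_num)]; omega

theorem floordiv_two_mul_add_one (i : Int) : PySem.Int.floordiv (2 * i + 1) 2 = i := by
  rw [PySem.Int.floordiv_eq_ediv_of_pos (by norm_num)]; omega

theorem mod_two_mul (i : Int) : PySem.Int.mod (2 * i) 2 = 0 := by
  rw [PySem.Int.mod_eq_emod_of_pos (by norm_num)]; omega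

theorem mod_two_mul_add_one (i : Int) : PySem.Int.mod (2 * i + 1) 2 = 1 := by
  rw [PySem.Int.mod_eq_emod_of_pos (by norm_num)]; omega

theorem pyGetD_take_neg_one (deck : List Int) (k : Nat) (h : deck.length = 2 * k + 1) :
    PySem.List.pyGetD (deck.take (k + 1)) (-1) 0 = PySem.List.pyGetD deck ((k : Nat) : Int) 0 := by
  have hne : deck.take (k + 1) ≠ [] := by
    simp [← List.length_pos_iff, h]
  rw [PySem.List.pyGetD_neg_one _ _ hne, PySem.List.pyGetD_natCast]
  have hk1 : k < deck.length := by omega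
  rw [List.getLast_eq_getElem, List.getD_eq_getElem?_getD, List.getElem?_eq_getElem hk1]
  simp [List.getElem_take, h, show min k (2*k) = k from by omega]

-- A equals the reference form.
theorem solution_eq_shufInt (deck : List Int) : solution deck = shufInt deck := by
  obtain ⟨k, hk | hk⟩ := Nat.even_or_odd' deck.length
  · -- even length 2k
    unfold solution shufInt
    simp only [hk]
    push_cast
    rw [mod_two_mul, floordiv_two_mul, floordiv_two_mul_add_one, if_pos rfl,
      foldl_pair_flatMap, map_pyRange_double]
    simp only [List.nil_append]
    congr 1
    funext i
    rw [mod_two_mul, floordiv_two_mul, mod_two_mul_add_one, floordiv_two_mul_add_one]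
    simp
  · -- odd length 2k+1
    unfold solution shufInt
    simp only [hk]
    push_cast
    rw [floordiv_two_mul_add_one, mod_two_mul_add_one, if_neg (by norm_num),
      show (2 * (k : Int) + 1 + 1) = 2 * ((k : Int) + 1) by ring, floordiv_two_mul,
      PySem.List.slice_toNat _ (by norm_num) (by positivity),
      PySem.List.slice_from _ (by positivity)]
    push_cast
    simp only [List.drop_zero, Nat.sub_zero,
      show ((k : Int) + 1).toNat = k + 1 by omega]
    rw [foldl_pair_flatMap, map_pyRange_double_succ, pyGetD_take_neg_one deck k hk]
    simp only [List.nil_append]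
    congr 1
    · refine List.flatMap_congr (fun i hi => ?_)
      obtain ⟨j, hj, rfl⟩ : ∃ j : Nat, j < k ∧ i = (j : Int) := by simpa using hi
      rw [mod_two_mul, floordiv_two_mul, mod_two_mul_add_one, floordiv_two_mul_add_one,
        pyGetD_take deck (k + 1) j (by omega), pyGetD_drop]
      push_cast
      simp
    · simp

theorem setStride2_length (xs : List Int) (out : List Int) (s : Nat) :
    (setStride2 out s xs).length = out.length := by
  induction xs generalizing out s with
  | nil => rfl
  | cons x rest ih => simp [setStride2, ih]

theorem setStride2_getElem?_skip (xs : List Int) (out : List Int) (s j : Nat)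
    (h : j < s ∨ (j - s) % 2 = 1) :
    (setStride2 out s xs)[j]? = out[j]? := by
  induction xs generalizing out s with
  | nil => rfl
  | cons x rest ih =>
    have hne : j ≠ s := by omega
    rw [setStride2, ih _ _ (by omega), List.getElem?_set_ne (Ne.symm hne)]

theorem setStride2_getElem?_hit (xs : List Int) (out : List Int) (s j : Nat)
    (hs : s ≤ j) (hp : (j - s) % 2 = 0) (hx : (j - s) / 2 < xs.length)
    (hj : j < out.length) :
    (setStride2 out s xs)[j]? = xs[(j - s) / 2]? := by
  induction xs generalizing out s with
  | nil => simp at hx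
  | cons x rest ih =>
    by_cases hje : j = s
    · subst hje
      rw [setStride2, setStride2_getElem?_skip _ _ _ _ (by omega),
        List.getElem?_set_self hj]
      simp
    · have h2 : s + 2 ≤ j := by omega
      rw [setStride2, ih _ (s + 2) h2 (by omega)
        (by simp at hx ⊢; omega) (by simpa using hj)]
      have : (j - s) / 2 = (j - (s + 2)) / 2 + 1 := by omega
      simp [this]

-- B equals the reference form, elementwise.
theorem solution_alt_eq_shufInt (deck : List Int) : solution_alt deck = shufInt deck := by
  set n := deck.length with hn
  set half := (n + 1) / 2 with hhalf
  have hlen_alt : (solution_alt deck).length = n := by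
    unfold solution_alt
    rw [setStride2_length, setStride2_length, List.length_replicate]
  have hlen_ref : (shufInt deck).length = n := by
    unfold shufInt
    simp [PySem.List.length_pyRange_one]
    exact hn.symm
  refine List.ext_getElem? (fun j => ?_)
  by_cases hjn : j < n
  · -- reference side
    have href : (shufInt deck)[j]? =
        some (if PySem.Int.mod (j : Int) 2 = 0
          then PySem.List.pyGetD deck (PySem.Int.floordiv (j : Int) 2) 0
          else PySem.List.pyGetD deck (PySem.Int.floordiv (j : Int) 2 + PySem.Int.floordiv ((n : Int) + 1) 2) 0) := by
      unfold shufInt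
      rw [PySem.List.getElem?_map_pyRange_zero _ _ _ hjn]
    have hhalfInt : PySem.Int.floordiv ((n : Int) + 1) 2 = (half : Int) := by
      rw [PySem.Int.floordiv_eq_ediv_of_pos (by norm_num), hhalf]; omega
    obtain ⟨m, hm | hm⟩ := Nat.even_or_odd' j
    · -- even position: element deck[j/2] from the first slice assignment
      have hmhalf : m < half := by omega
      have halt : (solution_alt deck)[j]? = deck[m]? := by
        unfold solution_alt
        rw [setStride2_getElem?_skip _ _ _ _ (by omega),
          setStride2_getElem?_hit _ _ 0 j (by omega) (by omega)
            (by rw [List.length_take]; omega) (by rw [List.length_replicate]; omega),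
          show (j - 0) / 2 = m by omega, List.getElem?_take]
        simp
        omega
      rw [halt, href, hm]
      push_cast
      rw [mod_two_mul, if_pos rfl, floordiv_two_mul, PySem.List.pyGetD_natCast,
        List.getD_eq_getElem?_getD, List.getElem?_eq_getElem (by omega)]
      simp
    · -- odd position: element deck[half + j/2] from the second slice assignment
      have hmlt : m < n - half := by omega
      have halt : (solution_alt deck)[j]? = deck[half + m]? := by
        unfold solution_alt
        rw [setStride2_getElem?_hit _ _ 1 j (by omega) (by omega)
            (by rw [List.length_drop]; omega)
            (by rw [setStride2_length, List.length_replicate]; omega),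
          show (j - 1) / 2 = m by omega, List.getElem?_drop]
      have hb : half + m < deck.length := by omega
      rw [halt, href, hm, List.getElem?_eq_getElem hb]
      push_cast
      rw [mod_two_mul_add_one, if_neg (by norm_num), floordiv_two_mul_add_one, hhalfInt,
        show ((m : Int) + half) = ((half + m : Nat) : Int) by push_cast; ring,
        PySem.List.pyGetD_natCast, List.getD_eq_getElem?_getD,
        List.getElem?_eq_getElem hb]
      simp
  · rw [List.getElem?_eq_none (by omega), List.getElem?_eq_none (by omega)]

-- ===== VERDICT (by name: the statement is the Claim_ definition above) =====
theorem solution_spec : Claim_equal_solution := by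
  intro deck _
  show solution deck = solution_alt deck
  rw [solution_eq_shufInt, solution_alt_eq_shufInt]
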